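-- pv_equiv track=rewrite | github.com/reshma12393/thinkpalm-agentai-ReshmaMM-Sandbox-D8 | src/agents/plan_narrative_agent.py | _coalesce_narrative_keys
-- ===== SOURCE A (Python) =====
-- from typing import Any, Literal
--
-- def _coalesce_narrative_keys(raw: dict[str, Any]) -> dict[str, Any]:
--     """Map common LLM key variants to canonical names."""
--     lk = {
--         str(k).strip().lower().replace(" ", "_").replace("-", "_"): v for k, v in raw.items()
--     }
--
--     def pick(*names: str) -> str:
--         for n in names:
--             if n in lk and lk[n] is not None:
--                 s = str(lk[n]).strip()
--                 if s:
--                     return s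
--         return ""
--
--     return {
--         "findings_summary": pick(
--             "findings_summary",
--             "finding_summary",
--             "summary",
--             "summary_of_findings",
--             "findings",
--             "assessment_summary",
--         ),
--         "recommendation": pick("recommendation", "recommendations", "rec", "remediation", "next_steps"),
--         "recommendation_summary": pick(
--             "recommendation_summary",
--             "rec_summary",
--             "summary_for_recommendation",
--             "action_summary",
--         ),
--         "root_cause": pick("root_cause", "rootcause", "cause", "diagnosis", "primary_issue"),
--         "severity": pick("severity", "risk", "impact"),
--     }
-- ===== SOURCE B (Python) =====
-- _INDEX = {
--     "findings_summary": ("findings_summary", 0),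
--     "finding_summary": ("findings_summary", 1),
--     "summary": ("findings_summary", 2),
--     "summary_of_findings": ("findings_summary", 3),
--     "findings": ("findings_summary", 4),
--     "assessment_summary": ("findings_summary", 5),
--     "recommendation": ("recommendation", 0),
--     "recommendations": ("recommendation", 1),
--     "rec": ("recommendation", 2),
--     "remediation": ("recommendation", 3),
--     "next_steps": ("recommendation", 4),
--     "recommendation_summary": ("recommendation_summary", 0),
--     "rec_summary": ("recommendation_summary", 1),
--     "summary_for_recommendation": ("recommendation_summary", 2),
--     "action_summary": ("recommendation_summary", 3),
--     "root_cause": ("root_cause", 0),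
--     "rootcause": ("root_cause", 1),
--     "cause": ("root_cause", 2),
--     "diagnosis": ("root_cause", 3),
--     "primary_issue": ("root_cause", 4),
--     "severity": ("severity", 0),
--     "risk": ("severity", 1),
--     "impact": ("severity", 2),
-- }
-- _FIELDS = ["findings_summary", "recommendation", "recommendation_summary", "root_cause", "severity"]
--
--
-- def _coalesce_narrative_keys(raw):
--     """Map common LLM key variants to canonical names (single pass over a reverse index)."""
--     lk = {
--         str(k).strip().lower().replace(" ", "_").replace("-", "_"): v for k, v in raw.items()
--     }
--     best = {}
--     for key, value in lk.items():
--         hit = _INDEX.get(key)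
--         if hit is None or value is None:
--             continue
--         field, rank = hit
--         s = str(value).strip()
--         if s and (field not in best or rank < best[field][0]):
--             best[field] = (rank, s)
--     return {f: best[f][1] if f in best else "" for f in _FIELDS}
-- ===== Notes on version B (the rewrite author's own statement) =====
-- stated objective: alternative
-- what changed: Replaced the five per-field first-match scans over ordered variant-name lists (pick) with a precomputed reverse index mapping each variant name to (canonical field, priority rank) and a single pass over the normalized dict that keeps, per field, the non-empty stripped value of lowest rank.
import Mathlib
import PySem

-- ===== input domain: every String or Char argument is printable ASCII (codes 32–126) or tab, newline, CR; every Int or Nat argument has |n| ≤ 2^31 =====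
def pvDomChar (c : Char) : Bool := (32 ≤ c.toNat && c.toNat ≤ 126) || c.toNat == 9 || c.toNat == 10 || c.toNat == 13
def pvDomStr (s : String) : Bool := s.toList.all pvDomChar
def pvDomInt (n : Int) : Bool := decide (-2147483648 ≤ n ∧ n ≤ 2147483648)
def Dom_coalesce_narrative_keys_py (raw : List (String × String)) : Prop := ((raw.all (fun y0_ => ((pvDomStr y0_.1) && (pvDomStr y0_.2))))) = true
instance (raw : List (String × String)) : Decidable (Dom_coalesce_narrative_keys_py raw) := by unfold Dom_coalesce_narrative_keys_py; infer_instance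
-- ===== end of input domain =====

-- B replaces A's five per-field first-match scans by a precomputed reverse index
-- variant-name -> (canonical field, priority rank) and a single pass over the normalized
-- dict keeping the lowest-rank non-empty value per field (objective: alternative decomposition).


-- ===== PORT A =====

-- str(k).strip().lower().replace(" ", "_").replace("-", "_")  (shared by both ports: the
-- same comprehension appears verbatim in both Python sources)
def pvNormKey (k : String) : String :=
  PySem.Str.replace (PySem.Str.replace (PySem.Str.lower (PySem.Str.strip k)) " " "_") "-" "_"

-- lk = { normalized k : v for k, v in raw.items() }
def pvLk (raw : List (String × String)) : PySem.Dict String String :=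
  raw.foldl (fun d kv => d.insert (pvNormKey kv.1) kv.2) PySem.Dict.empty

-- def pick(*names): for n in names: if n in lk and lk[n] is not None: s = str(lk[n]).strip(); if s: return s
-- (values are strings on this domain, so 'is not None' is always true and str() is the identity)
def pvPick (lk : PySem.Dict String String) : List String → String
  | [] => ""
  | n :: ns =>
    match lk.get? n with
    | some v => if PySem.Str.strip v != "" then PySem.Str.strip v else pvPick lk ns
    | none => pvPick lk ns

def coalesce_narrative_keys_py (raw : List (String × String)) : List (String × String) :=
  let lk := pvLk raw
  [("findings_summary", pvPick lk ["findings_summary", "finding_summary", "summary", "summary_of_findings", "findings", "assessment_summary"]),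
   ("recommendation", pvPick lk ["recommendation", "recommendations", "rec", "remediation", "next_steps"]),
   ("recommendation_summary", pvPick lk ["recommendation_summary", "rec_summary", "summary_for_recommendation", "action_summary"]),
   ("root_cause", pvPick lk ["root_cause", "rootcause", "cause", "diagnosis", "primary_issue"]),
   ("severity", pvPick lk ["severity", "risk", "impact"])]

-- ===== PORT B =====

-- _INDEX: reverse index  variant name -> (canonical field, priority rank)
def pvAltIndex : PySem.Dict String (String × Nat) := PySem.Dict.ofList
  [("findings_summary", ("findings_summary", 0)),
   ("finding_summary", ("findings_summary", 1)),
   ("summary", ("findings_summary", 2)),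
   ("summary_of_findings", ("findings_summary", 3)),
   ("findings", ("findings_summary", 4)),
   ("assessment_summary", ("findings_summary", 5)),
   ("recommendation", ("recommendation", 0)),
   ("recommendations", ("recommendation", 1)),
   ("rec", ("recommendation", 2)),
   ("remediation", ("recommendation", 3)),
   ("next_steps", ("recommendation", 4)),
   ("recommendation_summary", ("recommendation_summary", 0)),
   ("rec_summary", ("recommendation_summary", 1)),
   ("summary_for_recommendation", ("recommendation_summary", 2)),
   ("action_summary", ("recommendation_summary", 3)),
   ("root_cause", ("root_cause", 0)),
   ("rootcause", ("root_cause", 1)),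
   ("cause", ("root_cause", 2)),
   ("diagnosis", ("root_cause", 3)),
   ("primary_issue", ("root_cause", 4)),
   ("severity", ("severity", 0)),
   ("risk", ("severity", 1)),
   ("impact", ("severity", 2))]

def pvAltFields : List String :=
  ["findings_summary", "recommendation", "recommendation_summary", "root_cause", "severity"]

-- loop body: hit = _INDEX.get(key); if hit: s = value.strip();
--            if s and (field not in best or rank < best[field][0]): best[field] = (rank, s)
def pvAltStep (bd : PySem.Dict String (Nat × String)) (kv : String × String) :
    PySem.Dict String (Nat × String) :=
  match pvAltIndex.get? kv.1 with
  | none => bd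
  | some fr =>
    let s := PySem.Str.strip kv.2
    if s != "" && (match bd.get? fr.1 with | none => true | some p => decide (fr.2 < p.1))
    then bd.insert fr.1 (fr.2, s) else bd

def coalesce_narrative_keys_py_alt (raw : List (String × String)) : List (String × String) :=
  let lk := raw.foldl (fun d kv => d.insert (pvNormKey kv.1) kv.2) PySem.Dict.empty
  let best := lk.items.foldl pvAltStep PySem.Dict.empty
  pvAltFields.map (fun f => (f, match best.get? f with | some p => p.2 | none => ""))

-- ===== PRECONDITION & SPEC =====
def Spec_coalesce_narrative_keys_py (raw : List (String × String)) (out : List (String × String)) : Prop := out = coalesce_narrative_keys_py_alt raw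
instance (raw : List (String × String)) (out : List (String × String)) : Decidable (Spec_coalesce_narrative_keys_py raw out) := by unfold Spec_coalesce_narrative_keys_py; infer_instance

-- ===== CLAIM (what is proved, stated in full; the proofs are below) =====
def Claim_equal_coalesce_narrative_keys_py : Prop := ∀ (raw : List (String × String)), Dom_coalesce_narrative_keys_py raw → Spec_coalesce_narrative_keys_py raw (coalesce_narrative_keys_py raw)

-- ===== LEMMAS AND PROOFS =====

-- candidate contributed by one (key, value) pair to a field whose ordered name list is ns
def pvCand (ns : List String) (kv : String × String) : Option (Nat × String) :=
  match List.idxOf? kv.1 ns with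
  | some r => if PySem.Str.strip kv.2 != "" then some (r, PySem.Str.strip kv.2) else none
  | none => none

-- keep the candidate of lower rank (left wins ties)
def pvMerge : Option (Nat × String) → Option (Nat × String) → Option (Nat × String)
  | none, c => c
  | some b, none => some b
  | some b, some c => if c.1 < b.1 then some c else some b

-- (rank, value) of the first name in ns that has a non-empty stripped value in items
def pvPickOpt (items : List (String × String)) : List String → Option (Nat × String)
  | [] => none
  | n :: ns =>
    match (PySem.Dict.mk items).get? n with
    | some v =>
      if PySem.Str.strip v != "" then some (0, PySem.Str.strip v)
      else (pvPickOpt items ns).map (fun p => (p.1 + 1, p.2))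
    | none => (pvPickOpt items ns).map (fun p => (p.1 + 1, p.2))

def pvOptVal : Option (Nat × String) → String
  | some p => p.2
  | none => ""

theorem pvMerge_none_right (b : Option (Nat × String)) : pvMerge b none = b := by
  cases b <;> rfl

theorem pvMerge_assoc (a b c : Option (Nat × String)) :
    pvMerge (pvMerge a b) c = pvMerge a (pvMerge b c) := by
  cases a <;> cases b <;> cases c <;> (try rfl) <;> simp only [pvMerge] <;>
    split_ifs <;> (try rfl) <;> simp only [pvMerge] <;> split_ifs <;> first | rfl | omega

theorem pvMerge_map_succ (a b : Option (Nat × String)) :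
    (pvMerge a b).map (fun p => (p.1 + 1, p.2)) =
      pvMerge (a.map (fun p => (p.1 + 1, p.2))) (b.map (fun p => (p.1 + 1, p.2))) := by
  cases a <;> cases b <;> simp only [Option.map, pvMerge] <;> split_ifs <;> first | rfl | omega

theorem pvPickOpt_nil (ns : List String) : pvPickOpt [] ns = none := by
  induction ns with
  | nil => rfl
  | cons n ns ih =>
    have h : ({ items := [] } : PySem.Dict String String).get? n = none := rfl
    simp [pvPickOpt, h, ih]

-- A's pick is the value of the optimal candidate
theorem pvPick_eq_pickOpt (d : PySem.Dict String String) (ns : List String) :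
    pvPick d ns = pvOptVal (pvPickOpt d.items ns) := by
  induction ns with
  | nil => rfl
  | cons n ns ih =>
    show pvPick d (n :: ns) = pvOptVal (pvPickOpt d.items (n :: ns))
    have hd : (PySem.Dict.mk d.items) = d := rfl
    simp only [pvPick, pvPickOpt, hd]
    cases h : d.get? n with
    | none =>
      simp only [ih]
      cases pvPickOpt d.items ns <;> rfl
    | some v =>
      by_cases hs : PySem.Str.strip v != ""
      · simp [hs, pvOptVal]
      · simp only [hs, ih, Bool.false_eq_true]
        cases pvPickOpt d.items ns <;> rfl

-- splitting off the first item (needs unique keys so the tail cannot shadow it)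
theorem pvPickOpt_cons (x : String × String) (items : List (String × String))
    (hk : x.1 ∉ items.map Prod.fst) (ns : List String) (hns : ns.Nodup) :
    pvPickOpt (x :: items) ns = pvMerge (pvCand ns x) (pvPickOpt items ns) := by
  induction ns with
  | nil => simp [pvPickOpt, pvCand, List.idxOf?, pvMerge]
  | cons n ns ih =>
    have hns' : ns.Nodup := hns.of_cons
    have hnone : x.1 ∉ items.map Prod.fst → ((PySem.Dict.mk items).get? x.1 = none) := by
      intro h
      rw [PySem.Dict.get?_eq_none_iff_not_mem_keys]
      simpa [PySem.Dict.keys_mk] using h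
    by_cases hx : x.1 = n
    · -- head item's key is the first name
      by_cases hs : PySem.Str.strip x.2 != ""
      · -- non-empty value: it wins at rank 0
        have h0 : (PySem.Dict.mk (x :: items)).get? n = some x.2 := by
          rw [PySem.Dict.get?_mk_cons]; simp [hx]
        have h1 : (PySem.Dict.mk items).get? n = none := by
          rw [← hx]; exact hnone hk
        simp only [pvPickOpt, h0, h1, hs, if_pos]
        have hc : pvCand (n :: ns) x = some (0, PySem.Str.strip x.2) := by
          simp [pvCand, List.idxOf?_cons, hx, hs]
        rw [hc]
        cases pvPickOpt items ns <;> simp [pvMerge]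
      · -- empty value: the head item contributes nothing
        have h0 : (PySem.Dict.mk (x :: items)).get? n = some x.2 := by
          rw [PySem.Dict.get?_mk_cons]; simp [hx]
        have h1 : (PySem.Dict.mk items).get? n = none := by
          rw [← hx]; exact hnone hk
        have hxn : x.1 ∉ ns := by rw [hx]; exact (List.nodup_cons.mp hns).1
        have hcand' : pvCand ns x = none := by
          simp [pvCand, List.idxOf?_eq_none_iff.mpr hxn]
        simp only [pvPickOpt, h0, h1, hs, Bool.false_eq_true, if_false]
        rw [ih hns', hcand']
        have hc : pvCand (n :: ns) x = none := by
          simp [pvCand, List.idxOf?_cons, hx, hs]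
        rw [hc]
        simp [pvMerge]
    · -- head item's key is not the first name
      have h0 : (PySem.Dict.mk (x :: items)).get? n = (PySem.Dict.mk items).get? n := by
        rw [PySem.Dict.get?_mk_cons]; simp [hx]
      have hcand : pvCand (n :: ns) x = (pvCand ns x).map (fun p => (p.1 + 1, p.2)) := by
        simp only [pvCand, List.idxOf?_cons]
        have : (n == x.1) = false := by simp [Ne.symm hx]
        rw [this]
        simp only [Bool.false_eq_true, if_false]
        cases List.idxOf? x.1 ns with
        | none => rfl
        | some r => by_cases hs : PySem.Str.strip x.2 != "" <;> simp [hs]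
      cases h : (PySem.Dict.mk items).get? n with
      | some v =>
        by_cases hs : PySem.Str.strip v != ""
        · -- tail already answers with rank 0, which beats any shifted candidate
          simp only [pvPickOpt, h0, h, hs, if_pos, hcand]
          cases hc : pvCand ns x with
          | none => rfl
          | some c => simp [pvMerge]
        · simp only [pvPickOpt, h0, h, hs, Bool.false_eq_true, if_false, hcand]
          rw [ih hns', pvMerge_map_succ]
      | none =>
        simp only [pvPickOpt, h0, h, hcand]
        rw [ih hns', pvMerge_map_succ]

-- the single-field min-rank fold computes the optimal candidate
theorem pvFold_merge (items : List (String × String)) (ns : List String)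
    (hk : (items.map Prod.fst).Nodup) (hns : ns.Nodup) (b : Option (Nat × String)) :
    items.foldl (fun acc kv => pvMerge acc (pvCand ns kv)) b = pvMerge b (pvPickOpt items ns) := by
  induction items generalizing b with
  | nil => simp [pvPickOpt_nil, pvMerge_none_right]
  | cons x items ih =>
    have hk' : (items.map Prod.fst).Nodup := (List.nodup_cons.mp hk).2
    have hx : x.1 ∉ items.map Prod.fst := (List.nodup_cons.mp hk).1
    simp only [List.foldl_cons]
    rw [ih hk', pvPickOpt_cons x items hx ns hns, ← pvMerge_assoc]

-- every hit of the reverse index is one of its 23 literal entries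
theorem pvAltIndex_cases (k : String) (p : String × Nat) (h : pvAltIndex.get? k = some p) :
    (k, p) ∈ pvAltIndex.items := PySem.Dict.mem_items_of_get?_eq_some _ h

-- the reverse index restricted to field f agrees with idxOf? in f's name list
def pvIdxSpec (f : String) (ns : List String) : Prop :=
  ∀ k, (pvAltIndex.get? k).bind (fun p => if p.1 = f then some p.2 else none) = List.idxOf? k ns

theorem pvIdxSpec_of (f : String) (ns : List String)
    (hsub : ∀ n ∈ ns, n ∈ pvAltIndex.keys)
    (hlit : ∀ k p, (k, p) ∈ pvAltIndex.items →
      (if p.1 = f then some p.2 else none) = List.idxOf? k ns) :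
    pvIdxSpec f ns := by
  intro k
  cases h : pvAltIndex.get? k with
  | none =>
    have hk : k ∉ pvAltIndex.keys := (PySem.Dict.get?_eq_none_iff_not_mem_keys _ _).mp h
    have : k ∉ ns := fun hm => hk (hsub k hm)
    simp [List.idxOf?_eq_none_iff.mpr this]
  | some p =>
    simpa using hlit k p (pvAltIndex_cases k p h)

-- the multi-field single pass, projected to one field, is the single-field min-rank fold
theorem pvDecouple (f : String) (ns : List String) (hspec : pvIdxSpec f ns)
    (items : List (String × String)) (bd : PySem.Dict String (Nat × String)) :
    (items.foldl pvAltStep bd).get? f =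
      items.foldl (fun acc kv => pvMerge acc (pvCand ns kv)) (bd.get? f) := by
  induction items generalizing bd with
  | nil => rfl
  | cons kv items ih =>
    simp only [List.foldl_cons]
    have hstep : (pvAltStep bd kv).get? f = pvMerge (bd.get? f) (pvCand ns kv) := by
      have hs := hspec kv.1
      unfold pvAltStep pvCand
      cases h : pvAltIndex.get? kv.1 with
      | none =>
        rw [h] at hs
        simp only [Option.bind] at hs
        rw [← hs]
        exact (pvMerge_none_right _).symm
      | some fr =>
        rw [h] at hs
        simp only [Option.bind] at hs
        by_cases hf : fr.1 = f
        · subst hf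
          rw [if_pos rfl] at hs
          rw [← hs]
          by_cases hv : (PySem.Str.strip kv.2 != "") = true
          · cases hb : bd.get? fr.1 with
            | none =>
              simp only [hb, hv, Bool.and_true, if_true]
              simp [PySem.Dict.get?_insert_self, pvMerge, hb]
            | some p =>
              by_cases hr : fr.2 < p.1
              · simp only [hb, hv, hr, decide_true, Bool.and_true, if_true]
                simp [PySem.Dict.get?_insert_self, pvMerge, hb, hr]
              · have hr' : decide (fr.2 < p.1) = false := by simp [hr]
                simp only [hb, hv, hr', Bool.and_false, if_false]
                simp [pvMerge, hb, hr]
          · have hv' : (PySem.Str.strip kv.2 != "") = false := by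
              simpa using hv
            simp only [hv', Bool.false_and, if_false]
            cases hb : bd.get? fr.1 <;> simp [pvMerge, hv', hb]
        · rw [if_neg hf] at hs
          rw [← hs]
          have hne : f ≠ fr.1 := fun hh => hf hh.symm
          by_cases hcond : (PySem.Str.strip kv.2 != "" &&
              (match bd.get? fr.1 with | none => true | some p => decide (fr.2 < p.1))) = true
          · simp only [hcond, if_true]
            rw [PySem.Dict.get?_insert_of_ne bd _ hne]
            exact (pvMerge_none_right _).symm
          · simp only [hcond, if_false]
            exact (pvMerge_none_right _).symm
    rw [ih, hstep]

theorem pvLk_keys_nodup (raw : List (String × String)) : (pvLk raw).keys.Nodup := by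
  unfold pvLk
  exact PySem.Dict.nodup_keys_foldl_insert_key raw (fun kv => pvNormKey kv.1)
    (fun _ kv => kv.2) PySem.Dict.empty (by simp [PySem.Dict.keys_empty])

-- one field of B's output equals A's pick for that field
theorem pvField_eq (raw : List (String × String)) (f : String) (ns : List String)
    (hspec : pvIdxSpec f ns) (hns : ns.Nodup) :
    (match ((pvLk raw).items.foldl pvAltStep PySem.Dict.empty).get? f with
      | some p => p.2 | none => "") = pvPick (pvLk raw) ns := by
  have hk : ((pvLk raw).items.map Prod.fst).Nodup := pvLk_keys_nodup raw
  rw [pvPick_eq_pickOpt]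
  rw [pvDecouple f ns hspec _ PySem.Dict.empty]
  rw [show (PySem.Dict.empty : PySem.Dict String (Nat × String)).get? f = none from rfl]
  rw [pvFold_merge _ ns hk hns none]
  cases pvPickOpt (pvLk raw).items ns <;> rfl

theorem pvSpec1 : pvIdxSpec "findings_summary"
    ["findings_summary", "finding_summary", "summary", "summary_of_findings", "findings", "assessment_summary"] := by
  refine pvIdxSpec_of _ _ (fun n h => ?_) (fun k p h => ?_) <;> fin_cases h <;> decide

theorem pvSpec2 : pvIdxSpec "recommendation"
    ["recommendation", "recommendations", "rec", "remediation", "next_steps"] := by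
  refine pvIdxSpec_of _ _ (fun n h => ?_) (fun k p h => ?_) <;> fin_cases h <;> decide

theorem pvSpec3 : pvIdxSpec "recommendation_summary"
    ["recommendation_summary", "rec_summary", "summary_for_recommendation", "action_summary"] := by
  refine pvIdxSpec_of _ _ (fun n h => ?_) (fun k p h => ?_) <;> fin_cases h <;> decide

theorem pvSpec4 : pvIdxSpec "root_cause"
    ["root_cause", "rootcause", "cause", "diagnosis", "primary_issue"] := by
  refine pvIdxSpec_of _ _ (fun n h => ?_) (fun k p h => ?_) <;> fin_cases h <;> decide

theorem pvSpec5 : pvIdxSpec "severity" ["severity", "risk", "impact"] := by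
  refine pvIdxSpec_of _ _ (fun n h => ?_) (fun k p h => ?_) <;> fin_cases h <;> decide

-- ===== VERDICT (by name: the statement is the Claim_ definition above) =====
theorem coalesce_narrative_keys_py_spec : Claim_equal_coalesce_narrative_keys_py := by
  intro raw _
  unfold Spec_coalesce_narrative_keys_py coalesce_narrative_keys_py coalesce_narrative_keys_py_alt
  show _ = pvAltFields.map _
  rw [show (raw.foldl (fun d kv => d.insert (pvNormKey kv.1) kv.2) PySem.Dict.empty) = pvLk raw from rfl]
  simp only [pvAltFields, List.map_cons, List.map_nil]
  rw [pvField_eq raw _ _ pvSpec1 (by decide), pvField_eq raw _ _ pvSpec2 (by decide),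
      pvField_eq raw _ _ pvSpec3 (by decide), pvField_eq raw _ _ pvSpec4 (by decide),
      pvField_eq raw _ _ pvSpec5 (by decide)]
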